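-- pv_equiv track=rewrite | github.com/sid12153/financial-risk-disclosure-analysis | api/rag/retrieve_lexical_baseline.py | tokenize_simple
-- ===== SOURCE A (Python) =====
-- from typing import List, Tuple
--
-- def tokenize_simple(s: str) -> List[str]:
--     # simple, deterministic tokenizer
--     out: List[str] = []
--     cur = []
--
--     for ch in s.lower():
--         if ch.isalnum():
--             cur.append(ch)
--         else:
--             if cur:
--                 out.append("".join(cur))
--                 cur = []
--     if cur:
--         out.append("".join(cur))
--
--     return out
-- ===== SOURCE B (Python) =====
-- from typing import List
--
-- def tokenize_simple(s: str) -> List[str]: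
--     # Stage 1: lowercase and mask every non-alphanumeric character with a space.
--     masked = "".join(ch if ch.isalnum() else " " for ch in s.lower())
--     # Stage 2: whitespace split yields exactly the alphanumeric runs.
--     return masked.split()
-- ===== Notes on version B (the rewrite author's own statement) =====
-- stated objective: alternative
-- what changed: Replaces A's single-pass buffer-and-flush accumulator loop with two staged passes: first build a masked string in which every non-alphanumeric character becomes a space, then delegate run extraction to str.split(), so no token buffer or flush logic exists.
import Mathlib
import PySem

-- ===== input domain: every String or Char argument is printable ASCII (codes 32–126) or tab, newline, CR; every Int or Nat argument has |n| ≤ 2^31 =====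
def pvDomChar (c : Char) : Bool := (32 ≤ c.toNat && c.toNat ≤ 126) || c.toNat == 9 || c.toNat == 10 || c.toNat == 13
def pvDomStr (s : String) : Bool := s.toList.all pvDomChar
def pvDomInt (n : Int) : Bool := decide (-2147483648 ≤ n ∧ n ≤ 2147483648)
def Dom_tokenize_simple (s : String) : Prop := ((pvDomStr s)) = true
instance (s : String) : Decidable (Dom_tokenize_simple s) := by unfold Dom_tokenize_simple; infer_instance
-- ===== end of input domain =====

-- B replaces A's buffer-and-flush loop with two staged passes: mask non-alnum chars to spaces, then str.split() (alternative decomposition).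

-- ===== PORT A =====
-- state: (out, cur); one step per character of s.lower(), then the final flush
def tokenize_simple_step (st : List String × List Char) (ch : Char) : List String × List Char :=
  if PySem.Chars.isalnum ch then (st.1, st.2 ++ [ch])
  else if st.2.isEmpty then st
  else (st.1 ++ [String.ofList st.2], [])

def tokenize_simple (s : String) : List String :=
  let r := (PySem.Str.lower s).toList.foldl tokenize_simple_step ([], [])
  if r.2.isEmpty then r.1 else r.1 ++ [String.ofList r.2]

-- ===== PORT B =====
-- stage 1: ch if ch.isalnum() else " "
def tokenize_simple_mask (c : Char) : Char :=
  if PySem.Chars.isalnum c then c else ' '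

def tokenize_simple_alt (s : String) : List String :=
  let masked := String.ofList (((PySem.Str.lower s).toList).map tokenize_simple_mask)
  PySem.Str.split₀ masked

-- ===== PRECONDITION & SPEC =====
def Spec_tokenize_simple (s : String) (out : List String) : Prop := out = tokenize_simple_alt s
instance (s : String) (out : List String) : Decidable (Spec_tokenize_simple s out) := by unfold Spec_tokenize_simple; infer_instance

-- ===== CLAIM (what is proved, stated in full; the proofs are below) =====
def Claim_equal_tokenize_simple : Prop := ∀ (s : String), Dom_tokenize_simple s → Spec_tokenize_simple s (tokenize_simple s)

-- ===== LEMMAS AND PROOFS =====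

-- reference form: A's loop with the accumulator made explicit
def pvCollect : List Char → List Char → List String
  | cur, [] => if cur.isEmpty then [] else [String.ofList cur]
  | cur, c :: cs =>
    if PySem.Chars.isalnum c then pvCollect (cur ++ [c]) cs
    else if cur.isEmpty then pvCollect [] cs
    else String.ofList cur :: pvCollect [] cs

theorem pvA_foldl (l : List Char) : ∀ (out : List String) (cur : List Char),
    (let r := l.foldl tokenize_simple_step (out, cur);
     if r.2.isEmpty then r.1 else r.1 ++ [String.ofList r.2]) = out ++ pvCollect cur l := by
  induction l with
  | nil =>
    intro out cur
    simp only [List.foldl_nil, pvCollect]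
    by_cases h : cur.isEmpty <;> simp [h]
  | cons c cs ih =>
    intro out cur
    simp only [List.foldl_cons, pvCollect, tokenize_simple_step]
    by_cases ha : PySem.Chars.isalnum c
    · simpa [ha] using ih out (cur ++ [c])
    · by_cases hc : cur.isEmpty
      · have hcur : cur = [] := List.isEmpty_iff.mp hc
        subst hcur; simpa [ha] using ih out []
      · simpa [ha, hc] using ih (out ++ [String.ofList cur]) []

theorem pv_alnum_not_space (c : Char) (h : PySem.Chars.isalnum c = true) :
    PySem.Chars.isspace c = false := by
  simp only [PySem.Chars.isalnum, PySem.Chars.isalpha, PySem.Chars.isdigit,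
    PySem.Chars.isupper, PySem.Chars.islower, Char.le_def, UInt32.le_iff_toNat_le,
    Bool.or_eq_true, Bool.and_eq_true, decide_eq_true_eq] at h
  simp only [PySem.Chars.isspace, Char.toNat]
  have e1 : '0'.val.toNat = 48 := rfl
  have e2 : '9'.val.toNat = 57 := rfl
  have e3 : 'A'.val.toNat = 65 := rfl
  have e4 : 'Z'.val.toNat = 90 := rfl
  have e5 : 'a'.val.toNat = 97 := rfl
  have e6 : 'z'.val.toNat = 122 := rfl
  rw [e1, e2, e3, e4, e5, e6] at h
  simp only [Bool.or_eq_false_iff, Bool.and_eq_false_iff, decide_eq_false_iff_not]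
  omega

theorem pv_isspace_mask (c : Char) :
    PySem.Chars.isspace (tokenize_simple_mask c) = !PySem.Chars.isalnum c := by
  unfold tokenize_simple_mask
  by_cases h : PySem.Chars.isalnum c
  · simp [h, pv_alnum_not_space c h]
  · simp [h]; decide

theorem pv_go_mask (l : List Char) : ∀ (cur : List Char) (acc : List (List Char)),
    (PySem.Chars.split₀.go (l.map tokenize_simple_mask) cur acc).map String.ofList
      = acc.reverse.map String.ofList ++ pvCollect cur.reverse l := by
  induction l with
  | nil =>
    intro cur acc
    simp only [List.map_nil, PySem.Chars.split₀.go, pvCollect]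
    by_cases h : cur.isEmpty
    · have : cur = [] := List.isEmpty_iff.mp h
      subst this; simp
    · have : ¬ cur.reverse.isEmpty := by
        simp only [List.isEmpty_iff] at *; simpa using h
      simp [h, this]
  | cons c cs ih =>
    intro cur acc
    simp only [List.map_cons, PySem.Chars.split₀.go, pv_isspace_mask]
    by_cases ha : PySem.Chars.isalnum c
    · -- alnum: mask keeps c, not a space
      rw [if_neg (by simp [ha]), show tokenize_simple_mask c = c from by
        simp [tokenize_simple_mask, ha]]
      rw [ih (c :: cur) acc]
      simp [pvCollect, ha]
    · -- non-alnum: mask gives a space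
      rw [if_pos (by simp [ha])]
      by_cases hc : cur.isEmpty
      · have : cur = [] := List.isEmpty_iff.mp hc
        subst this
        rw [if_pos hc, ih [] acc]
        simp [pvCollect, ha]
      · rw [if_neg hc, ih [] (cur.reverse :: acc)]
        have hcr : ¬ cur.reverse.isEmpty := by
          simp only [List.isEmpty_iff] at *; simpa using hc
        simp only [pvCollect, List.reverse_nil]
        rw [if_neg ha, if_neg hcr]
        simp

-- ===== VERDICT (by name: the statement is the Claim_ definition above) =====
theorem tokenize_simple_spec : Claim_equal_tokenize_simple := by
  intro s _
  unfold Spec_tokenize_simple tokenize_simple tokenize_simple_alt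
  rw [pvA_foldl (PySem.Str.lower s).toList [] []]
  unfold PySem.Str.split₀ PySem.Chars.split₀
  have h := pv_go_mask (PySem.Str.lower s).toList [] []
  simp only [List.reverse_nil, List.map_nil, List.nil_append] at h
  simp only [String.toList_ofList, List.nil_append]
  exact h.symm
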